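-- pv_equiv track=rewrite | github.com/KATO-Hiro/AtCoder | AtCoder_Virtual_Contest/macle_20220522/c/main.py | count_cells
-- ===== SOURCE A (Python) =====
-- def count_cells(grids, h: int, w: int):
--     dot = '.'
--     up = [[1 if grids[i][j] == dot else 0 for j in range(w)] for i in range(h)]
--     down = [[1 if grids[i][j] == dot else 0 for j in range(w)] for i in range(h)]
--     left = [[1 if grids[i][j] == dot else 0 for j in range(w)] for i in range(h)]
--     right = [[1 if grids[i][j] == dot else 0 for j in range(w)] for i in range(h)]
--
--     for i in range(h - 2, -1, -1):
--         for j in range(w):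
--             if (grids[i][j] == dot):
--                 up[i][j] = up[i + 1][j] + 1
--
--     for i in range(1, h):
--         for j in range(w):
--             if (grids[i][j] == dot):
--                 down[i][j] = down[i - 1][j] + 1
--
--     for i in range(h):
--         for j in range(w - 2, -1, -1):
--             if (grids[i][j] == dot):
--                 left[i][j] = left[i][j + 1] + 1
--
--     for i in range(h):
--         for j in range(1, w):
--             if (grids[i][j] == dot):
--                 right[i][j] = right[i][j - 1] + 1
--
--     ans = 0
--
--     for i in range(h):
--         for j in range(w):
--             if grids[i][j] == dot:
--                 count = (up[i][j] + down[i][j] - 1) + (left[i][j] + right[i][j] - 1) - 1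
--
--                 ans = max(ans, count)
--
--     return ans
-- ===== SOURCE B (Python) =====
-- def _runs(cells):
--     # run-length array: each cell of a maximal run of '.' gets that run's length, walls get 0
--     n = len(cells)
--     out = []
--     i = 0
--     while i < n:
--         if cells[i] == '.':
--             k = i
--             while k < n and cells[k] == '.':
--                 k += 1
--             out.extend([k - i] * (k - i))
--             i = k
--         else:
--             out.append(0)
--             i += 1
--     return out
--
--
-- def count_cells(grids, h: int, w: int):
--     rows = [[grids[i][j] for j in range(w)] for i in range(h)]
--     hrun = [_runs(r) for r in rows]
--     vrun = [_runs(list(c)) for c in zip(*rows)]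
--     ans = 0
--     for i in range(h):
--         for j in range(w):
--             if grids[i][j] == '.':
--                 ans = max(ans, hrun[i][j] + vrun[j][i] - 1)
--     return ans
-- ===== Notes on version B (the rewrite author's own statement) =====
-- stated objective: simpler
-- what changed: Replaces the four directional prefix DP arrays (up/down/left/right) with two run-length arrays built by scanning each row and each column once for maximal '.'-runs; the answer is hrun+vrun-1 per dot cell.
import Mathlib
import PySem

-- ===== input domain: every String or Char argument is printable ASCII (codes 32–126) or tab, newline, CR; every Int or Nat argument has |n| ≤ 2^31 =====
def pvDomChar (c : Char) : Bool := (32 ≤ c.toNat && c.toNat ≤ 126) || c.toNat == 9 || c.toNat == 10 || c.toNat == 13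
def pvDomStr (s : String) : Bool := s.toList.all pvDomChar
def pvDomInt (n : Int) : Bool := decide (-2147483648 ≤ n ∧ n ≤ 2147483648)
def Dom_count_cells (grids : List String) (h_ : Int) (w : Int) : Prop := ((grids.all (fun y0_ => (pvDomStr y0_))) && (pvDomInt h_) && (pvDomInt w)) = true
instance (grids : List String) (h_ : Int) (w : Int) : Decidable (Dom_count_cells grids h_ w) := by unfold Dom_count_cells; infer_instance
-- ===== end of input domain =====

-- B replaces A's four directional prefix DP arrays by per-row/per-column maximal-run scans (objective: simpler decomposition).

-- ===== PORT A =====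
-- grids[i][j]; exact for 0 ≤ i < len(grids), 0 ≤ j < len(grids[i]) (the only reads under Pre_)
def pvCell (grids : List String) (i j : Int) : Char :=
  PySem.List.pyGetD (PySem.List.pyGetD grids i "").toList j '#'

-- functional 2D array: pvUpd a i j v is a with a[i][j] = v
def pvUpd (a : Int → Int → Int) (i j : Int) (v : Int) : Int → Int → Int :=
  fun i' j' => if i' = i ∧ j' = j then v else a i' j'

def count_cells (grids : List String) (h_ : Int) (w : Int) : Int :=
  let init : Int → Int → Int := fun i j => if pvCell grids i j == '.' then 1 else 0
  let up := (PySem.List.pyRange (h_ - 2) (-1) (-1)).foldl (fun a i =>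
    (PySem.List.pyRange 0 w 1).foldl (fun a j =>
      if pvCell grids i j == '.' then pvUpd a i j (a (i + 1) j + 1) else a) a) init
  let down := (PySem.List.pyRange 1 h_ 1).foldl (fun a i =>
    (PySem.List.pyRange 0 w 1).foldl (fun a j =>
      if pvCell grids i j == '.' then pvUpd a i j (a (i - 1) j + 1) else a) a) init
  let left := (PySem.List.pyRange 0 h_ 1).foldl (fun a i =>
    (PySem.List.pyRange (w - 2) (-1) (-1)).foldl (fun a j =>
      if pvCell grids i j == '.' then pvUpd a i j (a i (j + 1) + 1) else a) a) init
  let right := (PySem.List.pyRange 0 h_ 1).foldl (fun a i =>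
    (PySem.List.pyRange 1 w 1).foldl (fun a j =>
      if pvCell grids i j == '.' then pvUpd a i j (a i (j - 1) + 1) else a) a) init
  (PySem.List.pyRange 0 h_ 1).foldl (fun ans i =>
    (PySem.List.pyRange 0 w 1).foldl (fun ans j =>
      if pvCell grids i j == '.' then
        max ans ((up i j + down i j - 1) + (left i j + right i j - 1) - 1)
      else ans) ans) 0

-- ===== PORT B =====
-- run-length array of one line: each cell of a maximal '.'-run gets the run's length, walls get 0
def pvRuns (cs : List Char) : List Int :=
  match cs with
  | [] => []
  | c :: rest =>
    if c == '.' then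
      let k := (rest.takeWhile (fun x => x == '.')).length + 1
      List.replicate k (k : Int) ++ pvRuns (rest.drop (k - 1))
    else 0 :: pvRuns rest
termination_by cs.length
decreasing_by
  · simp only [List.length_drop, List.length_cons]; omega
  · simp

def pvRow (grids : List String) (w i : Int) : List Char :=
  (PySem.List.pyRange 0 w 1).map (fun j => pvCell grids i j)

-- termination measure for pvCols
lemma pvColsTerm (rows : List (List Char)) (hall : ∀ r ∈ rows, r ≠ []) (hne : rows ≠ []) :
    ((rows.map (fun r => r.tail)).map (fun r => r.length)).sum < (rows.map (fun r => r.length)).sum := by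
  induction rows with
  | nil => simp at hne
  | cons r rs _ =>
    simp only [List.map_cons, List.sum_cons, List.map_map]
    have hr : r ≠ [] := hall r (by simp)
    have h1 : r.tail.length < r.length := by
      cases r with
      | nil => simp at hr
      | cons a t => simp
    have h2 : (rs.map (fun r => r.tail.length)).sum ≤ (rs.map (fun r => r.length)).sum :=
      List.sum_le_sum (fun x _ => by cases x <;> simp)
    simp only [Function.comp_def] at *
    omega

def pvTails (rows : List (List Char)) : List (List Char) := rows.map (fun r => r.tail)

-- zip(*rows): exact for the rectangular row lists B builds (each row has the same length)
def pvCols (rows : List (List Char)) : List (List Char) :=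
  if h : rows = [] ∨ rows.any (fun r => r.isEmpty) then []
  else (rows.map (fun r => r.headD ' ')) :: pvCols (pvTails rows)
termination_by (rows.map (fun r => r.length)).sum
decreasing_by
  rw [not_or] at h
  refine pvColsTerm rows ?_ h.1
  intro r hr hemp
  exact h.2 (List.any_eq_true.mpr ⟨r, hr, by simp [hemp]⟩)

def count_cells_alt (grids : List String) (h_ : Int) (w : Int) : Int :=
  let rows := (PySem.List.pyRange 0 h_ 1).map (fun i => pvRow grids w i)
  let hrun := rows.map (fun r => pvRuns r)
  let vrun := (pvCols rows).map (fun c => pvRuns c)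
  (PySem.List.pyRange 0 h_ 1).foldl (fun ans i =>
    (PySem.List.pyRange 0 w 1).foldl (fun ans j =>
      if pvCell grids i j == '.' then
        max ans (PySem.List.pyGetD (PySem.List.pyGetD hrun i []) j 0 +
                 PySem.List.pyGetD (PySem.List.pyGetD vrun j []) i 0 - 1)
      else ans) ans) 0

-- ===== PRECONDITION & SPEC =====
-- A raises IndexError iff some accessed grids[i][j] (0 ≤ i < h, 0 ≤ j < w) is out of range; Pre_ excludes exactly that.
def Pre_count_cells (grids : List String) (h_ : Int) (w : Int) : Prop :=
  h_ ≤ 0 ∨ w ≤ 0 ∨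
    (h_ ≤ (grids.length : Int) ∧ ∀ s ∈ grids.take h_.toNat, w ≤ (s.toList.length : Int))
instance (grids : List String) (h_ : Int) (w : Int) : Decidable (Pre_count_cells grids h_ w) := by
  unfold Pre_count_cells; infer_instance

def pvWitness_count_cells : List String × Int × Int := ([".#.", "...", "#.."], 3, 3)

def Spec_count_cells (grids : List String) (h_ : Int) (w : Int) (out : Int) : Prop := out = count_cells_alt grids h_ w
instance (grids : List String) (h_ : Int) (w : Int) (out : Int) : Decidable (Spec_count_cells grids h_ w out) := by unfold Spec_count_cells; infer_instance

-- ===== CLAIM (what is proved, stated in full; the proofs are below) =====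
def Claim_equal_count_cells : Prop := ∀ (grids : List String) (h_ : Int) (w : Int), Dom_count_cells grids h_ w → Pre_count_cells grids h_ w → Spec_count_cells grids h_ w (count_cells grids h_ w)

-- ===== LEMMAS AND PROOFS =====

def pvF (cs : List Char) (j : Nat) : Nat := ((cs.drop j).takeWhile (fun x => x == '.')).length
def pvB (cs : List Char) (j : Nat) : Nat := ((cs.take j).reverse.takeWhile (fun x => x == '.')).length

lemma drop_len_takeWhile (p : Char → Bool) (l : List Char) :
    List.drop (l.takeWhile p).length l = l.dropWhile p := by
  induction l with
  | nil => simp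
  | cons a t ih =>
    by_cases h : p a
    · simp [h, ih]
    · simp [h]

lemma head_dropWhile_false (p : Char → Bool) (l cs : List Char) (c : Char)
    (hl : List.dropWhile p l = c :: cs) : p c = false := by
  induction l with
  | nil => simp at hl
  | cons a t ih =>
    rw [List.dropWhile_cons] at hl
    split at hl
    · exact ih hl
    · cases hl; simp_all

lemma takeWhile_all (p : Char → Bool) (l : List Char) (h : ∀ x ∈ l, p x = true) :
    List.takeWhile p l = l := List.takeWhile_eq_self_iff.mpr h

lemma takeWhile_append_all (p : Char → Bool) (X Y : List Char) (h : ∀ x ∈ X, p x = true) :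
    List.takeWhile p (X ++ Y) = X ++ List.takeWhile p Y := by
  rw [List.takeWhile_append, takeWhile_all p X h]; simp

lemma takeWhile_append_stop (p : Char → Bool) (X Y : List Char) (hx : ∃ x ∈ X, p x = false) :
    List.takeWhile p (X ++ Y) = List.takeWhile p X := by
  rw [List.takeWhile_append]
  split
  · rename_i hlen
    have hx' : List.takeWhile p X = X := (List.takeWhile_prefix p).eq_of_length hlen
    obtain ⟨x, hmem, hpx⟩ := hx
    rw [← hx'] at hmem
    have := List.mem_takeWhile_imp hmem
    simp_all
  · rfl

lemma pvF_succ (cs : List Char) (j : Nat) (hj : j < cs.length) (hd : cs[j] = '.') :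
    pvF cs j = pvF cs (j + 1) + 1 := by
  unfold pvF
  rw [List.drop_eq_getElem_cons hj]
  simp [hd]

lemma pvF_stop (cs : List Char) (j : Nat) (hj : j < cs.length) (hd : ¬ cs[j] = '.') :
    pvF cs j = 0 := by
  unfold pvF
  rw [List.drop_eq_getElem_cons hj]
  simp [hd]

lemma pvF_ge (cs : List Char) (j : Nat) (hj : cs.length ≤ j) : pvF cs j = 0 := by
  unfold pvF
  rw [List.drop_of_length_le hj]
  simp

lemma pvB_zero (cs : List Char) : pvB cs 0 = 0 := by simp [pvB]

lemma pvB_succ (cs : List Char) (j : Nat) (hj : j < cs.length) :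
    pvB cs (j + 1) = if cs[j] = '.' then pvB cs j + 1 else 0 := by
  unfold pvB
  rw [List.take_add_one, List.getElem?_eq_getElem hj]
  simp only [Option.toList_some, List.reverse_append, List.reverse_cons, List.reverse_nil,
    List.nil_append, List.singleton_append, List.takeWhile_cons]
  by_cases hd : cs[j] = '.'
  · simp [hd]
  · simp [hd]


lemma takeWhile_append_singleton_false (p : Char → Bool) (X : List Char) (c : Char) (hc : p c = false) :
    List.takeWhile p (X ++ [c]) = List.takeWhile p X := by
  rw [List.takeWhile_append]
  split
  · rename_i hlen
    rw [(List.takeWhile_prefix p).eq_of_length hlen]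
    simp [hc]
  · rfl

lemma pvB_in_prefix (pre suf : List Char) (hpre : ∀ x ∈ pre, (x == '.') = true)
    (j : Nat) (hj : j ≤ pre.length) : pvB (pre ++ suf) j = j := by
  unfold pvB
  rw [List.take_append_of_le_length hj, takeWhile_all]
  · simp [hj]
  · intro x hx
    exact hpre x (List.mem_of_mem_take (List.mem_reverse.mp hx))

lemma pvF_in_prefix (pre suf : List Char) (hpre : ∀ x ∈ pre, (x == '.') = true)
    (hsuf : ∀ c0 cs0, suf = c0 :: cs0 → (c0 == '.') = false)
    (j : Nat) (hj : j ≤ pre.length) : pvF (pre ++ suf) j = pre.length - j := by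
  unfold pvF
  rw [List.drop_append_of_le_length hj, takeWhile_append_all]
  · have : List.takeWhile (fun x => x == '.') suf = [] := by
      cases hs : suf with
      | nil => rfl
      | cons c0 cs0 => rw [List.takeWhile_cons, hsuf c0 cs0 hs]; rfl
    simp [this]
  · intro x hx
    exact hpre x (List.mem_of_mem_drop hx)

lemma pvB_past_prefix (pre suf : List Char) (c0 : Char) (cs0 : List Char)
    (hs : suf = c0 :: cs0) (hc0 : (c0 == '.') = false)
    (j : Nat) (hj : 1 ≤ j) : pvB (pre ++ suf) (pre.length + j) = pvB suf j := by
  unfold pvB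
  rw [List.take_append]
  rw [List.take_of_length_le (by omega : pre.length ≤ pre.length + j)]
  rw [show pre.length + j - pre.length = j from by omega]
  rw [List.reverse_append]
  rw [takeWhile_append_stop _ _ _ ⟨c0, by
        rw [List.mem_reverse, hs]
        cases j with
        | zero => omega
        | succ m => simp [List.take_succ_cons], hc0⟩]

lemma pvF_past_prefix (pre suf : List Char) (j : Nat) :
    pvF (pre ++ suf) (pre.length + j) = pvF suf j := by
  unfold pvF
  rw [List.drop_append, List.drop_of_length_le (by omega : pre.length ≤ pre.length + j)]
  simp

lemma pvRuns_getD (cs : List Char) : ∀ (j : Nat), cs[j]? = some '.' →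
    (pvRuns cs).getD j 0 = (pvB cs j : Int) + (pvF cs j : Int) := by
  induction cs using pvRuns.induct with
  | case1 => intro j hd; simp at hd
  | case2 c rest hc _k IH =>
    intro j hd
    have hc' : c = '.' := by simpa using hc
    subst hc'
    set t := (List.takeWhile (fun x => x == '.') rest).length with ht
    have hdw : rest.drop t = List.dropWhile (fun x => x == '.') rest := drop_len_takeWhile _ _
    have hsplit : '.' :: rest = ('.' :: List.takeWhile (fun x => x == '.') rest) ++ rest.drop t := by
      rw [hdw]
      simp [List.takeWhile_append_dropWhile]
    have hpre : ∀ x ∈ '.' :: List.takeWhile (fun x => x == '.') rest, (x == '.') = true := by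
      intro x hx
      rcases List.mem_cons.mp hx with h | h
      · simp [h]
      · exact List.mem_takeWhile_imp (p := fun x => x == '.') h
    have hsuf : ∀ c0 cs0, rest.drop t = c0 :: cs0 → (c0 == '.') = false := by
      intro c0 cs0 h0
      exact head_dropWhile_false _ rest cs0 c0 (by rw [← hdw, h0])
    have hlenpre : ('.' :: List.takeWhile (fun x => x == '.') rest).length = t + 1 := by simp [ht]
    have hruns : pvRuns ('.' :: rest) = List.replicate (t + 1) ((t : Int) + 1) ++ pvRuns (rest.drop t) := by
      rw [pvRuns]
      simp only [ht]
      norm_num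
    by_cases hjt : j ≤ t
    · have hB : pvB ('.' :: rest) j = j := by
        rw [hsplit]; exact pvB_in_prefix _ _ hpre j (by omega)
      have hF : pvF ('.' :: rest) j = (t + 1) - j := by
        rw [hsplit]
        rw [show pvF _ j = _ from pvF_in_prefix _ _ hpre hsuf j (by omega), hlenpre]
      rw [hruns, hB, hF, List.getD_append _ _ _ _ (by simp; omega)]
      rw [List.getD_eq_getElem _ _ (by simp; omega), List.getElem_replicate]
      omega
    · -- j ≥ t + 1
      have hm : ∃ m, j = (t + 1) + m := ⟨j - (t+1), by omega⟩
      obtain ⟨m, rfl⟩ := hm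
      obtain ⟨c0, cs0, hs⟩ : ∃ c0 cs0, rest.drop t = c0 :: cs0 := by
        have hlt : t + 1 + m < ('.' :: rest).length := (List.getElem?_eq_some_iff.mp hd).1
        rw [hsplit] at hlt
        cases h0 : rest.drop t with
        | nil => rw [h0] at hlt; simp [hlenpre] at hlt; omega
        | cons a b => exact ⟨a, b, rfl⟩
      have hd' : (rest.drop t)[m]? = some '.' := by
        rw [hsplit] at hd
        rwa [List.getElem?_append_right (by omega), hlenpre, Nat.add_sub_cancel_left] at hd
      have hm1 : 1 ≤ m := by
        rcases Nat.eq_zero_or_pos m with h0 | h0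
        · subst h0
          rw [hs] at hd'
          simp at hd'
          have hcon := hsuf c0 cs0 hs
          rw [hd'] at hcon
          simp at hcon
        · exact h0
      have hB : pvB ('.' :: rest) (t + 1 + m) = pvB (rest.drop t) m := by
        rw [hsplit, show t + 1 + m = ('.' :: List.takeWhile (fun x => x == '.') rest).length + m by rw [hlenpre]]
        exact pvB_past_prefix _ _ c0 cs0 hs (by rw [hs] at hsuf; exact hsuf c0 cs0 rfl) m hm1
      have hF : pvF ('.' :: rest) (t + 1 + m) = pvF (rest.drop t) m := by
        rw [hsplit, show t + 1 + m = ('.' :: List.takeWhile (fun x => x == '.') rest).length + m by rw [hlenpre]]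
        exact pvF_past_prefix _ _ m
      rw [hruns, hB, hF, List.getD_append_right _ _ _ _ (by simp)]
      rw [show t + 1 + m - (List.replicate (t + 1) ((t : Int) + 1)).length = m by simp]
      exact IH m hd'
  | case3 c rest hc IH =>
    intro j hd
    cases j with
    | zero =>
      simp at hd
      rw [hd] at hc
      simp at hc
    | succ m =>
      have hd' : rest[m]? = some '.' := by simpa using hd
      have hB : pvB (c :: rest) (m + 1) = pvB rest m := by
        unfold pvB
        rw [List.take_succ_cons, List.reverse_cons, takeWhile_append_singleton_false _ _ _ (by simpa using hc)]
      have hF : pvF (c :: rest) (m + 1) = pvF rest m := by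
        unfold pvF
        rw [List.drop_succ_cons]
      rw [pvRuns]
      simp only [if_neg hc]
      rw [List.getD_cons_succ, hB, hF]
      exact IH m hd'


lemma pvRuns_length (cs : List Char) : (pvRuns cs).length = cs.length := by
  induction cs using pvRuns.induct with
  | case1 => rw [pvRuns]; rfl
  | case2 c rest hc _k IH =>
    rw [pvRuns]
    simp only [if_pos hc, List.length_append, List.length_replicate, List.length_cons]
    rw [IH]
    simp only [List.length_drop]
    have hk : _k = (rest.takeWhile (fun x => x == '.')).length + 1 := rfl
    have hle : (rest.takeWhile (fun x => x == '.')).length ≤ rest.length := (List.takeWhile_prefix _).length_le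
    omega
  | case3 c rest hc IH =>
    rw [pvRuns]
    simp only [if_neg hc]
    simp [IH]

-- column j of the grid (proof-side view; B reaches it through pvCols)
def pvCol (grids : List String) (h_ j : Int) : List Char :=
  (PySem.List.pyRange 0 h_ 1).map (fun i => pvCell grids i j)

lemma pvRow_length (grids : List String) (w i : Int) : (pvRow grids w i).length = w.toNat := by
  simp [pvRow, PySem.List.length_pyRange_one]

lemma pvCol_length (grids : List String) (h_ j : Int) : (pvCol grids h_ j).length = h_.toNat := by
  simp [pvCol, PySem.List.length_pyRange_one]

lemma pvRow_get (grids : List String) (w i : Int) (m : Nat) (hm : m < ((PySem.List.pyRange 0 w 1).map (fun j => pvCell grids i j)).length) :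
    (pvRow grids w i)[m]'(by simpa [pvRow] using hm) = pvCell grids i (m : Int) := by
  simp [pvRow, PySem.List.getElem_pyRange_one]

lemma pvCol_get (grids : List String) (h_ j : Int) (m : Nat) (hm : m < ((PySem.List.pyRange 0 h_ 1).map (fun i => pvCell grids i j)).length) :
    (pvCol grids h_ j)[m]'(by simpa [pvCol] using hm) = pvCell grids (m : Int) j := by
  simp [pvCol, PySem.List.getElem_pyRange_one]

-- parallel line update: each cell of row i updated from row i+d (d ≠ 0), positions independent
lemma linePar (i d : Int) (hd : d ≠ 0) (P : Int → Bool) (hi : Int) :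
    ∀ (lo : Int) (a0 : Int → Int → Int) (i' j' : Int),
      ((PySem.List.pyRange lo hi 1).foldl
        (fun a j => if P j then pvUpd a i j (a (i + d) j + 1) else a) a0) i' j'
      = if i' = i ∧ lo ≤ j' ∧ j' < hi ∧ P j' = true then a0 (i + d) j' + 1 else a0 i' j' := by
  suffices H : ∀ (n : Nat) (lo : Int), (hi - lo).toNat = n → ∀ a0 i' j',
      ((PySem.List.pyRange lo hi 1).foldl
        (fun a j => if P j then pvUpd a i j (a (i + d) j + 1) else a) a0) i' j'
      = if i' = i ∧ lo ≤ j' ∧ j' < hi ∧ P j' = true then a0 (i + d) j' + 1 else a0 i' j' by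
    intro lo; exact H _ lo rfl
  intro n
  induction n with
  | zero =>
    intro lo hn a0 i' j'
    rw [PySem.List.pyRange_one_eq_nil (by omega), List.foldl_nil, if_neg]
    rintro ⟨-, h2, h3, -⟩; omega
  | succ n ih =>
    intro lo hn a0 i' j'
    rw [PySem.List.pyRange_one_cons (by omega), List.foldl_cons]
    rw [ih (lo + 1) (by omega)]
    have hne : i + d ≠ i := by omega
    by_cases hP : P lo = true
    · simp only [hP, if_true]
      by_cases hcond : i' = i ∧ lo + 1 ≤ j' ∧ j' < hi ∧ P j' = true
      · rw [if_pos hcond, if_pos ⟨hcond.1, by omega, hcond.2.2⟩]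
        simp [pvUpd, hne]
      · rw [if_neg hcond]
        by_cases hcond2 : i' = i ∧ lo ≤ j' ∧ j' < hi ∧ P j' = true
        · -- must be j' = lo
          have hj' : j' = lo := by
            rcases hcond2 with ⟨h1, h2, h3, h4⟩
            by_contra hne'
            exact hcond ⟨h1, by omega, h3, h4⟩
          rw [if_pos hcond2]
          simp [pvUpd, hcond2.1, hj']
        · rw [if_neg hcond2]
          simp only [pvUpd]
          rw [if_neg]
          rintro ⟨h1, h2⟩
          exact hcond2 ⟨h1, by omega, by omega, by rwa [h2]⟩
    · simp only [hP]
      simp only [Bool.false_eq_true, if_false]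
      by_cases hcond : i' = i ∧ lo + 1 ≤ j' ∧ j' < hi ∧ P j' = true
      · rw [if_pos hcond, if_pos ⟨hcond.1, by omega, hcond.2.2⟩]
      · rw [if_neg hcond, if_neg]
        rintro ⟨h1, h2, h3, h4⟩
        refine hcond ⟨h1, ?_, h3, h4⟩
        rcases eq_or_lt_of_le h2 with h | h
        · rw [h] at hP; exact absurd h4 hP
        · omega

lemma lineSeqAsc (i : Int) (P : Int → Bool) (F : Int → Int) (hi : Int) :
    ∀ (lo : Int) (a0 : Int → Int → Int),
      (∀ j, lo ≤ j → j < hi → P j = true → F j = F (j - 1) + 1) →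
      (∀ j, ¬(lo ≤ j ∧ j < hi) → F j = a0 i j) →
      (∀ j, lo ≤ j → j < hi → P j = false → F j = a0 i j) →
      ∀ i' j', ((PySem.List.pyRange lo hi 1).foldl
        (fun a j => if P j then pvUpd a i j (a i (j - 1) + 1) else a) a0) i' j'
        = if i' = i ∧ lo ≤ j' ∧ j' < hi then F j' else a0 i' j' := by
  suffices H : ∀ (n : Nat) (lo : Int), (hi - lo).toNat = n → ∀ a0,
      (∀ j, lo ≤ j → j < hi → P j = true → F j = F (j - 1) + 1) →
      (∀ j, ¬(lo ≤ j ∧ j < hi) → F j = a0 i j) →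
      (∀ j, lo ≤ j → j < hi → P j = false → F j = a0 i j) →
      ∀ i' j', ((PySem.List.pyRange lo hi 1).foldl
        (fun a j => if P j then pvUpd a i j (a i (j - 1) + 1) else a) a0) i' j'
        = if i' = i ∧ lo ≤ j' ∧ j' < hi then F j' else a0 i' j' by
    intro lo; exact H _ lo rfl
  intro n
  induction n with
  | zero =>
    intro lo hn a0 _ _ _ i' j'
    rw [PySem.List.pyRange_one_eq_nil (by omega), List.foldl_nil, if_neg]
    rintro ⟨-, h2, h3⟩; omega
  | succ n ih =>
    intro lo hn a0 hrec hout hnp i' j'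
    rw [PySem.List.pyRange_one_cons (by omega), List.foldl_cons]
    -- a1 = body a0 lo
    have ha1lo : (if P lo then pvUpd a0 i lo (a0 i (lo - 1) + 1) else a0) i lo = F lo := by
      by_cases hP : P lo = true
      · rw [if_pos hP]
        have hv : pvUpd a0 i lo (a0 i (lo - 1) + 1) i lo = a0 i (lo - 1) + 1 := by simp [pvUpd]
        rw [hv, hrec lo le_rfl (by omega) hP, hout (lo - 1) (by omega)]
      · rw [if_neg hP]
        exact (hnp lo le_rfl (by omega) (by simpa using hP)).symm
    have ha1off : ∀ i'' j'', ¬(i'' = i ∧ j'' = lo) →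
        (if P lo then pvUpd a0 i lo (a0 i (lo - 1) + 1) else a0) i'' j'' = a0 i'' j'' := by
      intro i'' j'' hne
      by_cases hP : P lo = true
      · rw [if_pos hP]; simp only [pvUpd, if_neg hne]
      · rw [if_neg hP]
    rw [ih (lo + 1) (by omega) _ (fun j h1 h2 h3 => hrec j (by omega) h2 h3)
        (by
          intro j hj
          by_cases hjlo : j = lo
          · subst hjlo; exact (ha1lo).symm
          · rw [ha1off i j (by tauto), ← hout j (by omega)])
        (by
          intro j h1 h2 h3
          by_cases hjlo : j = lo
          · subst hjlo; exact ha1lo.symm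
          · rw [ha1off i j (by tauto), ← hnp j (by omega) h2 h3])]
    by_cases hc : i' = i ∧ lo + 1 ≤ j' ∧ j' < hi
    · rw [if_pos hc, if_pos ⟨hc.1, by omega, hc.2.2⟩]
    · rw [if_neg hc]
      by_cases hc2 : i' = i ∧ lo ≤ j' ∧ j' < hi
      · have hj' : j' = lo := by
          rcases hc2 with ⟨h1, h2, h3⟩
          by_contra hne'
          exact hc ⟨h1, by omega, h3⟩
        rw [if_pos hc2, hj', hc2.1, ha1lo]
      · rw [if_neg hc2]
        apply ha1off
        rintro ⟨h1, h2⟩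
        by_cases hlohi : lo < hi
        · exact hc2 ⟨h1, by omega, by omega⟩
        · omega

lemma lineSeqDesc (i : Int) (P : Int → Bool) (F : Int → Int) :
    ∀ (s : Int) (a0 : Int → Int → Int),
      (∀ j, 0 ≤ j → j ≤ s → P j = true → F j = F (j + 1) + 1) →
      (∀ j, ¬(0 ≤ j ∧ j ≤ s) → F j = a0 i j) →
      (∀ j, 0 ≤ j → j ≤ s → P j = false → F j = a0 i j) →
      ∀ i' j', ((PySem.List.pyRange s (-1) (-1)).foldl
        (fun a j => if P j then pvUpd a i j (a i (j + 1) + 1) else a) a0) i' j'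
        = if i' = i ∧ 0 ≤ j' ∧ j' ≤ s then F j' else a0 i' j' := by
  suffices H : ∀ (n : Nat) (s : Int), (s + 1).toNat = n → ∀ a0,
      (∀ j, 0 ≤ j → j ≤ s → P j = true → F j = F (j + 1) + 1) →
      (∀ j, ¬(0 ≤ j ∧ j ≤ s) → F j = a0 i j) →
      (∀ j, 0 ≤ j → j ≤ s → P j = false → F j = a0 i j) →
      ∀ i' j', ((PySem.List.pyRange s (-1) (-1)).foldl
        (fun a j => if P j then pvUpd a i j (a i (j + 1) + 1) else a) a0) i' j'
        = if i' = i ∧ 0 ≤ j' ∧ j' ≤ s then F j' else a0 i' j' by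
    intro s; exact H _ s rfl
  intro n
  induction n with
  | zero =>
    intro s hn a0 _ _ _ i' j'
    rw [PySem.List.pyRange_neg_one_eq_nil (by omega), List.foldl_nil, if_neg]
    rintro ⟨-, h2, h3⟩; omega
  | succ n ih =>
    intro s hn a0 hrec hout hnp i' j'
    rw [PySem.List.pyRange_neg_one_cons (by omega), List.foldl_cons]
    have ha1lo : (if P s then pvUpd a0 i s (a0 i (s + 1) + 1) else a0) i s = F s := by
      by_cases hP : P s = true
      · rw [if_pos hP]
        have hv : pvUpd a0 i s (a0 i (s + 1) + 1) i s = a0 i (s + 1) + 1 := by simp [pvUpd]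
        rw [hv, hrec s (by omega) le_rfl hP, hout (s + 1) (by omega)]
      · rw [if_neg hP]
        exact (hnp s (by omega) le_rfl (by simpa using hP)).symm
    have ha1off : ∀ i'' j'', ¬(i'' = i ∧ j'' = s) →
        (if P s then pvUpd a0 i s (a0 i (s + 1) + 1) else a0) i'' j'' = a0 i'' j'' := by
      intro i'' j'' hne
      by_cases hP : P s = true
      · rw [if_pos hP]; simp only [pvUpd, if_neg hne]
      · rw [if_neg hP]
    rw [ih (s - 1) (by omega) _ (fun j h1 h2 h3 => hrec j h1 (by omega) h3)
        (by
          intro j hj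
          by_cases hjs : j = s
          · subst hjs; exact ha1lo.symm
          · rw [ha1off i j (by tauto), ← hout j (by omega)])
        (by
          intro j h1 h2 h3
          by_cases hjs : j = s
          · subst hjs; exact ha1lo.symm
          · rw [ha1off i j (by tauto), ← hnp j h1 (by omega) h3])]
    by_cases hc : i' = i ∧ 0 ≤ j' ∧ j' ≤ s - 1
    · rw [if_pos hc, if_pos ⟨hc.1, hc.2.1, by omega⟩]
    · rw [if_neg hc]
      by_cases hc2 : i' = i ∧ 0 ≤ j' ∧ j' ≤ s
      · have hj' : j' = s := by
          rcases hc2 with ⟨h1, h2, h3⟩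
          by_contra hne'
          exact hc ⟨h1, h2, by omega⟩
        rw [if_pos hc2, hj', hc2.1, ha1lo]
      · rw [if_neg hc2]
        apply ha1off
        rintro ⟨h1, h2⟩
        exact hc2 ⟨h1, by omega, by omega⟩


def pvInit (grids : List String) : Int → Int → Int :=
  fun i j => if pvCell grids i j == '.' then 1 else 0

-- the four final directional values of A (proved equal to its arrays below)
def pvLf (grids : List String) (w : Int) : Int → Int → Int := fun i j =>
  if (pvCell grids i j == '.') = true ∧ 0 ≤ j ∧ j < w then ((pvF (pvRow grids w i) j.toNat : Nat) : Int)
  else pvInit grids i j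

def pvRf (grids : List String) (w : Int) : Int → Int → Int := fun i j =>
  if (pvCell grids i j == '.') = true ∧ 0 ≤ j ∧ j < w then ((pvB (pvRow grids w i) j.toNat : Nat) : Int) + 1
  else pvInit grids i j

def pvUf (grids : List String) (h_ w : Int) : Int → Int → Int := fun i j =>
  if (pvCell grids i j == '.') = true ∧ 0 ≤ i ∧ i < h_ ∧ 0 ≤ j ∧ j < w then ((pvF (pvCol grids h_ j) i.toNat : Nat) : Int)
  else pvInit grids i j

def pvDf (grids : List String) (h_ w : Int) : Int → Int → Int := fun i j =>
  if (pvCell grids i j == '.') = true ∧ 0 ≤ i ∧ i < h_ ∧ 0 ≤ j ∧ j < w then ((pvB (pvCol grids h_ j) i.toNat : Nat) : Int) + 1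
  else pvInit grids i j


lemma rowCell (grids : List String) (w i j : Int) (h0 : 0 ≤ j) (h1 : j < w) :
    (pvRow grids w i)[j.toNat]'(by rw [pvRow_length]; omega) = pvCell grids i j := by
  simpa [Int.toNat_of_nonneg h0] using
    pvRow_get grids w i j.toNat (by simp [PySem.List.length_pyRange_one]; omega)

lemma colCell (grids : List String) (h_ i j : Int) (h0 : 0 ≤ i) (h1 : i < h_) :
    (pvCol grids h_ j)[i.toNat]'(by rw [pvCol_length]; omega) = pvCell grids i j := by
  simpa [Int.toNat_of_nonneg h0] using
    pvCol_get grids h_ j i.toNat (by simp [PySem.List.length_pyRange_one]; omega)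

lemma rowF_succ (grids : List String) (w i j : Int) (h0 : 0 ≤ j) (h1 : j + 1 < w)
    (hdot : (pvCell grids i j == '.') = true) :
    pvF (pvRow grids w i) j.toNat = pvF (pvRow grids w i) (j + 1).toNat + 1 := by
  have hlt : j.toNat < (pvRow grids w i).length := by rw [pvRow_length]; omega
  have hc : (pvRow grids w i)[j.toNat]'hlt = '.' := by
    rw [rowCell grids w i j h0 (by omega)]; exact beq_iff_eq.mp hdot
  have := pvF_succ (pvRow grids w i) j.toNat hlt hc
  rwa [show (j + 1).toNat = j.toNat + 1 by omega]

lemma rowF_last (grids : List String) (w i j : Int) (h0 : 0 ≤ j) (h1 : j + 1 = w)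
    (hdot : (pvCell grids i j == '.') = true) :
    pvF (pvRow grids w i) j.toNat = 1 := by
  have hlt : j.toNat < (pvRow grids w i).length := by rw [pvRow_length]; omega
  have hc : (pvRow grids w i)[j.toNat]'hlt = '.' := by
    rw [rowCell grids w i j h0 (by omega)]; exact beq_iff_eq.mp hdot
  have h2 := pvF_succ (pvRow grids w i) j.toNat hlt hc
  have h3 : pvF (pvRow grids w i) (j.toNat + 1) = 0 :=
    pvF_ge _ _ (by rw [pvRow_length]; omega)
  omega

lemma rowF_stop (grids : List String) (w i j : Int) (h0 : 0 ≤ j) (h1 : j < w)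
    (hdot : ¬ (pvCell grids i j == '.') = true) :
    pvF (pvRow grids w i) j.toNat = 0 := by
  have hlt : j.toNat < (pvRow grids w i).length := by rw [pvRow_length]; omega
  refine pvF_stop (pvRow grids w i) j.toNat hlt ?_
  rw [rowCell grids w i j h0 h1]
  intro hh; exact hdot (by simp [hh])

lemma rowB_succ (grids : List String) (w i j : Int) (h0 : 1 ≤ j) (h1 : j < w) :
    pvB (pvRow grids w i) j.toNat
      = if (pvCell grids i (j - 1) == '.') = true then pvB (pvRow grids w i) (j - 1).toNat + 1 else 0 := by
  have hlt : (j - 1).toNat < (pvRow grids w i).length := by rw [pvRow_length]; omega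
  have h2 := pvB_succ (pvRow grids w i) (j - 1).toNat hlt
  rw [show (j - 1).toNat + 1 = j.toNat by omega] at h2
  rw [h2, rowCell grids w i (j - 1) (by omega) (by omega)]
  by_cases hd : pvCell grids i (j - 1) = '.'
  · rw [if_pos hd, if_pos (by simp [hd])]
  · rw [if_neg hd, if_neg (by simpa using hd)]

lemma colF_succ (grids : List String) (h_ i j : Int) (h0 : 0 ≤ i) (h1 : i + 1 < h_)
    (hdot : (pvCell grids i j == '.') = true) :
    pvF (pvCol grids h_ j) i.toNat = pvF (pvCol grids h_ j) (i + 1).toNat + 1 := by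
  have hlt : i.toNat < (pvCol grids h_ j).length := by rw [pvCol_length]; omega
  have hc : (pvCol grids h_ j)[i.toNat]'hlt = '.' := by
    rw [colCell grids h_ i j h0 (by omega)]; exact beq_iff_eq.mp hdot
  have := pvF_succ (pvCol grids h_ j) i.toNat hlt hc
  rwa [show (i + 1).toNat = i.toNat + 1 by omega]

lemma colF_last (grids : List String) (h_ i j : Int) (h0 : 0 ≤ i) (h1 : i + 1 = h_)
    (hdot : (pvCell grids i j == '.') = true) :
    pvF (pvCol grids h_ j) i.toNat = 1 := by
  have hlt : i.toNat < (pvCol grids h_ j).length := by rw [pvCol_length]; omega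
  have hc : (pvCol grids h_ j)[i.toNat]'hlt = '.' := by
    rw [colCell grids h_ i j h0 (by omega)]; exact beq_iff_eq.mp hdot
  have h2 := pvF_succ (pvCol grids h_ j) i.toNat hlt hc
  have h3 : pvF (pvCol grids h_ j) (i.toNat + 1) = 0 :=
    pvF_ge _ _ (by rw [pvCol_length]; omega)
  omega

lemma colF_stop (grids : List String) (h_ i j : Int) (h0 : 0 ≤ i) (h1 : i < h_)
    (hdot : ¬ (pvCell grids i j == '.') = true) :
    pvF (pvCol grids h_ j) i.toNat = 0 := by
  have hlt : i.toNat < (pvCol grids h_ j).length := by rw [pvCol_length]; omega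
  refine pvF_stop (pvCol grids h_ j) i.toNat hlt ?_
  rw [colCell grids h_ i j h0 h1]
  intro hh; exact hdot (by simp [hh])

lemma colB_succ (grids : List String) (h_ i j : Int) (h0 : 1 ≤ i) (h1 : i < h_) :
    pvB (pvCol grids h_ j) i.toNat
      = if (pvCell grids (i - 1) j == '.') = true then pvB (pvCol grids h_ j) (i - 1).toNat + 1 else 0 := by
  have hlt : (i - 1).toNat < (pvCol grids h_ j).length := by rw [pvCol_length]; omega
  have h2 := pvB_succ (pvCol grids h_ j) (i - 1).toNat hlt
  rw [show (i - 1).toNat + 1 = i.toNat by omega] at h2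
  rw [h2, colCell grids h_ (i - 1) j (by omega) (by omega)]
  by_cases hd : pvCell grids (i - 1) j = '.'
  · rw [if_pos hd, if_pos (by simp [hd])]
  · rw [if_neg hd, if_neg (by simpa using hd)]

lemma leftChar (grids : List String) (h_ w : Int) :
    ∀ i' j', ((PySem.List.pyRange 0 h_ 1).foldl (fun a i =>
        (PySem.List.pyRange (w - 2) (-1) (-1)).foldl (fun a j =>
          if pvCell grids i j == '.' then pvUpd a i j (a i (j + 1) + 1) else a) a) (pvInit grids)) i' j'
      = if 0 ≤ i' ∧ i' < h_ then pvLf grids w i' j' else pvInit grids i' j' := by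
  suffices H : ∀ (n : Nat) (t : Int), (h_ - t).toNat = n → ∀ a0 : Int → Int → Int,
      (∀ i j, t ≤ i → a0 i j = pvInit grids i j) →
      ∀ i' j', ((PySem.List.pyRange t h_ 1).foldl (fun a i =>
          (PySem.List.pyRange (w - 2) (-1) (-1)).foldl (fun a j =>
            if pvCell grids i j == '.' then pvUpd a i j (a i (j + 1) + 1) else a) a) a0) i' j'
        = if t ≤ i' ∧ i' < h_ then pvLf grids w i' j' else a0 i' j' by
    intro i' j'
    exact H _ 0 rfl (pvInit grids) (fun _ _ _ => rfl) i' j'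
  intro n
  induction n with
  | zero =>
    intro t hn a0 h0 i' j'
    rw [PySem.List.pyRange_one_eq_nil (by omega), List.foldl_nil, if_neg (by omega)]
  | succ n ih =>
    intro t hn a0 h0 i' j'
    rw [PySem.List.pyRange_one_cons (by omega), List.foldl_cons]
    have hrec : ∀ j, 0 ≤ j → j ≤ w - 2 → (pvCell grids t j == '.') = true →
        pvLf grids w t j = pvLf grids w t (j + 1) + 1 := by
      intro j hj0 hj1 hdot
      have hstep := rowF_succ grids w t j hj0 (by omega) hdot
      unfold pvLf
      rw [if_pos ⟨hdot, hj0, by omega⟩]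
      by_cases hd1 : (pvCell grids t (j + 1) == '.') = true
      · rw [if_pos ⟨hd1, by omega, by omega⟩]; omega
      · rw [if_neg (by tauto)]
        have hz := rowF_stop grids w t (j + 1) (by omega) (by omega) hd1
        unfold pvInit
        rw [if_neg hd1]
        omega
    have hout : ∀ j, ¬(0 ≤ j ∧ j ≤ w - 2) → pvLf grids w t j = a0 t j := by
      intro j hj
      rw [h0 t j le_rfl]
      unfold pvLf
      by_cases hc : (pvCell grids t j == '.') = true ∧ 0 ≤ j ∧ j < w
      · rw [if_pos hc]
        have : j + 1 = w := by omega
        rw [rowF_last grids w t j hc.2.1 this hc.1]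
        unfold pvInit
        rw [if_pos hc.1]
        norm_num
      · rw [if_neg hc]
    have hnp : ∀ j, 0 ≤ j → j ≤ w - 2 → (pvCell grids t j == '.') = false →
        pvLf grids w t j = a0 t j := by
      intro j hj0 hj1 hd
      rw [h0 t j le_rfl]
      unfold pvLf pvInit
      rw [if_neg (by simp [hd]), if_neg (by simp [hd])]
    have hint := lineSeqDesc t (fun j => pvCell grids t j == '.') (fun j => pvLf grids w t j)
      (w - 2) a0 hrec hout hnp
    have ha1 : ∀ i'' j'', ((PySem.List.pyRange (w - 2) (-1) (-1)).foldl (fun a j =>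
          if pvCell grids t j == '.' then pvUpd a t j (a t (j + 1) + 1) else a) a0) i'' j''
        = if i'' = t then pvLf grids w t j'' else a0 i'' j'' := by
      intro i'' j''
      rw [hint i'' j'']
      by_cases hc : i'' = t ∧ 0 ≤ j'' ∧ j'' ≤ w - 2
      · rw [if_pos hc, if_pos hc.1]
      · rw [if_neg hc]
        by_cases hc2 : i'' = t
        · rw [if_pos hc2, hout j'' (by tauto), hc2]
        · rw [if_neg hc2]
    have hstate : ∀ i j, t + 1 ≤ i → ((PySem.List.pyRange (w - 2) (-1) (-1)).foldl (fun a j =>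
          if pvCell grids t j == '.' then pvUpd a t j (a t (j + 1) + 1) else a) a0) i j = pvInit grids i j := by
      intro i j hi
      rw [ha1 i j, if_neg (by omega), h0 i j (by omega)]
    rw [ih (t + 1) (by omega) _ hstate i' j']
    by_cases hc : t + 1 ≤ i' ∧ i' < h_
    · rw [if_pos hc, if_pos ⟨by omega, hc.2⟩]
    · rw [if_neg hc, ha1 i' j']
      by_cases hc2 : i' = t
      · subst hc2
        rw [if_pos rfl, if_pos ⟨le_rfl, by omega⟩]
      · rw [if_neg hc2, if_neg (by omega)]

lemma rightChar (grids : List String) (h_ w : Int) :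
    ∀ i' j', ((PySem.List.pyRange 0 h_ 1).foldl (fun a i =>
        (PySem.List.pyRange 1 w 1).foldl (fun a j =>
          if pvCell grids i j == '.' then pvUpd a i j (a i (j - 1) + 1) else a) a) (pvInit grids)) i' j'
      = if 0 ≤ i' ∧ i' < h_ then pvRf grids w i' j' else pvInit grids i' j' := by
  suffices H : ∀ (n : Nat) (t : Int), (h_ - t).toNat = n → ∀ a0 : Int → Int → Int,
      (∀ i j, t ≤ i → a0 i j = pvInit grids i j) →
      ∀ i' j', ((PySem.List.pyRange t h_ 1).foldl (fun a i =>
          (PySem.List.pyRange 1 w 1).foldl (fun a j =>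
            if pvCell grids i j == '.' then pvUpd a i j (a i (j - 1) + 1) else a) a) a0) i' j'
        = if t ≤ i' ∧ i' < h_ then pvRf grids w i' j' else a0 i' j' by
    intro i' j'
    exact H _ 0 rfl (pvInit grids) (fun _ _ _ => rfl) i' j'
  intro n
  induction n with
  | zero =>
    intro t hn a0 h0 i' j'
    rw [PySem.List.pyRange_one_eq_nil (a := t) (b := h_) (by omega), List.foldl_nil, if_neg (by omega)]
  | succ n ih =>
    intro t hn a0 h0 i' j'
    rw [PySem.List.pyRange_one_cons (a := t) (b := h_) (by omega), List.foldl_cons]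
    have hrec : ∀ j, 1 ≤ j → j < w → (pvCell grids t j == '.') = true →
        pvRf grids w t j = pvRf grids w t (j - 1) + 1 := by
      intro j hj0 hj1 hdot
      have hstep := rowB_succ grids w t j hj0 hj1
      unfold pvRf
      rw [if_pos ⟨hdot, by omega, hj1⟩]
      by_cases hd1 : (pvCell grids t (j - 1) == '.') = true
      · rw [if_pos ⟨hd1, by omega, by omega⟩, hstep, if_pos hd1]
        push_cast
        ring
      · rw [if_neg (by tauto), hstep, if_neg hd1]
        unfold pvInit
        rw [if_neg hd1]
        norm_num
    have hout : ∀ j, ¬(1 ≤ j ∧ j < w) → pvRf grids w t j = a0 t j := by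
      intro j hj
      rw [h0 t j le_rfl]
      unfold pvRf
      by_cases hc : (pvCell grids t j == '.') = true ∧ 0 ≤ j ∧ j < w
      · rw [if_pos hc]
        have hj0 : j = 0 := by omega
        subst hj0
        rw [show ((0 : Int)).toNat = 0 from rfl, pvB_zero]
        unfold pvInit
        rw [if_pos hc.1]
        norm_num
      · rw [if_neg hc]
    have hnp : ∀ j, 1 ≤ j → j < w → (pvCell grids t j == '.') = false →
        pvRf grids w t j = a0 t j := by
      intro j hj0 hj1 hd
      rw [h0 t j le_rfl]
      unfold pvRf pvInit
      rw [if_neg (by simp [hd]), if_neg (by simp [hd])]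
    have hint := lineSeqAsc t (fun j => pvCell grids t j == '.') (fun j => pvRf grids w t j)
      w 1 a0 hrec hout hnp
    have ha1 : ∀ i'' j'', ((PySem.List.pyRange 1 w 1).foldl (fun a j =>
          if pvCell grids t j == '.' then pvUpd a t j (a t (j - 1) + 1) else a) a0) i'' j''
        = if i'' = t then pvRf grids w t j'' else a0 i'' j'' := by
      intro i'' j''
      rw [hint i'' j'']
      by_cases hc : i'' = t ∧ 1 ≤ j'' ∧ j'' < w
      · rw [if_pos hc, if_pos hc.1]
      · rw [if_neg hc]
        by_cases hc2 : i'' = t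
        · rw [if_pos hc2, hout j'' (by tauto), hc2]
        · rw [if_neg hc2]
    have hstate : ∀ i j, t + 1 ≤ i → ((PySem.List.pyRange 1 w 1).foldl (fun a j =>
          if pvCell grids t j == '.' then pvUpd a t j (a t (j - 1) + 1) else a) a0) i j = pvInit grids i j := by
      intro i j hi
      rw [ha1 i j, if_neg (by omega), h0 i j (by omega)]
    rw [ih (t + 1) (by omega) _ hstate i' j']
    by_cases hc : t + 1 ≤ i' ∧ i' < h_
    · rw [if_pos hc, if_pos ⟨by omega, hc.2⟩]
    · rw [if_neg hc, ha1 i' j']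
      by_cases hc2 : i' = t
      · subst hc2
        rw [if_pos rfl, if_pos ⟨le_rfl, by omega⟩]
      · rw [if_neg hc2, if_neg (by omega)]

lemma upChar (grids : List String) (h_ w : Int) :
    ∀ i' j', 0 ≤ i' → i' < h_ →
      ((PySem.List.pyRange (h_ - 2) (-1) (-1)).foldl (fun a i =>
        (PySem.List.pyRange 0 w 1).foldl (fun a j =>
          if pvCell grids i j == '.' then pvUpd a i j (a (i + 1) j + 1) else a) a) (pvInit grids)) i' j'
      = pvUf grids h_ w i' j' := by
  have initUf : ∀ i j : Int, h_ - 1 ≤ i → pvInit grids i j = pvUf grids h_ w i j := by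
    intro i j hi
    unfold pvUf
    by_cases hc : (pvCell grids i j == '.') = true ∧ 0 ≤ i ∧ i < h_ ∧ 0 ≤ j ∧ j < w
    · rw [if_pos hc, colF_last grids h_ i j hc.2.1 (by omega) hc.1]
      unfold pvInit
      rw [if_pos hc.1]
      norm_num
    · rw [if_neg hc]
  suffices H : ∀ (n : Nat) (t : Int), (t + 1).toNat = n → t ≤ h_ - 2 → ∀ a0 : Int → Int → Int,
      (∀ i j, i ≤ t → a0 i j = pvInit grids i j) →
      (∀ i j, t < i → a0 i j = pvUf grids h_ w i j) →
      ∀ i' j', ((PySem.List.pyRange t (-1) (-1)).foldl (fun a i =>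
          (PySem.List.pyRange 0 w 1).foldl (fun a j =>
            if pvCell grids i j == '.' then pvUpd a i j (a (i + 1) j + 1) else a) a) a0) i' j'
        = if 0 ≤ i' ∧ i' ≤ t then pvUf grids h_ w i' j' else a0 i' j' by
    intro i' j' h0 h1
    rw [H _ (h_ - 2) rfl le_rfl (pvInit grids) (fun _ _ _ => rfl)
        (fun i j hi => initUf i j (by omega)) i' j']
    by_cases hc : 0 ≤ i' ∧ i' ≤ h_ - 2
    · rw [if_pos hc]
    · rw [if_neg hc, initUf i' j' (by omega)]
  intro n
  induction n with
  | zero =>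
    intro t hn ht a0 h0 h1 i' j'
    rw [PySem.List.pyRange_neg_one_eq_nil (by omega), List.foldl_nil, if_neg (by omega)]
  | succ n ih =>
    intro t hn ht a0 h0 h1 i' j'
    rw [PySem.List.pyRange_neg_one_cons (by omega), List.foldl_cons]
    have hpar := linePar t 1 (by norm_num) (fun j => pvCell grids t j == '.') w 0 a0
    have ha1 : ∀ i'' j'', ((PySem.List.pyRange 0 w 1).foldl (fun a j =>
          if pvCell grids t j == '.' then pvUpd a t j (a (t + 1) j + 1) else a) a0) i'' j''
        = if i'' = t then pvUf grids h_ w t j'' else a0 i'' j'' := by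
      intro i'' j''
      rw [hpar i'' j'']
      by_cases hc : i'' = t ∧ 0 ≤ j'' ∧ j'' < w ∧ (pvCell grids t j'' == '.') = true
      · rw [if_pos hc, if_pos hc.1, h1 (t + 1) j'' (by omega)]
        have hflat : pvUf grids h_ w (t + 1) j'' = ((pvF (pvCol grids h_ j'') (t + 1).toNat : Nat) : Int) := by
          unfold pvUf
          by_cases hd1 : (pvCell grids (t + 1) j'' == '.') = true
          · rw [if_pos ⟨hd1, by omega, by omega, hc.2.1, hc.2.2.1⟩]
          · rw [if_neg (by tauto), colF_stop grids h_ (t + 1) j'' (by omega) (by omega) hd1]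
            unfold pvInit
            rw [if_neg hd1]
            norm_num
        rw [hflat]
        have hstep := colF_succ grids h_ t j'' (by omega) (by omega) hc.2.2.2
        unfold pvUf
        rw [if_pos ⟨hc.2.2.2, by omega, by omega, hc.2.1, hc.2.2.1⟩]
        omega
      · rw [if_neg hc]
        by_cases hc2 : i'' = t
        · subst hc2
          rw [if_pos rfl, h0 i'' j'' le_rfl]
          unfold pvUf
          rw [if_neg (by tauto)]
        · rw [if_neg hc2]
    have hs1 : ∀ i j, i ≤ t - 1 → ((PySem.List.pyRange 0 w 1).foldl (fun a j =>
          if pvCell grids t j == '.' then pvUpd a t j (a (t + 1) j + 1) else a) a0) i j = pvInit grids i j := by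
      intro i j hi
      rw [ha1 i j, if_neg (by omega), h0 i j (by omega)]
    have hs2 : ∀ i j, t - 1 < i → ((PySem.List.pyRange 0 w 1).foldl (fun a j =>
          if pvCell grids t j == '.' then pvUpd a t j (a (t + 1) j + 1) else a) a0) i j = pvUf grids h_ w i j := by
      intro i j hi
      rw [ha1 i j]
      by_cases hc : i = t
      · rw [if_pos hc, hc]
      · rw [if_neg hc, h1 i j (by omega)]
    rw [ih (t - 1) (by omega) (by omega) _ hs1 hs2 i' j']
    by_cases hc : 0 ≤ i' ∧ i' ≤ t - 1
    · rw [if_pos hc, if_pos ⟨hc.1, by omega⟩]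
    · rw [if_neg hc, ha1 i' j']
      by_cases hc2 : i' = t
      · subst hc2
        rw [if_pos rfl, if_pos ⟨by omega, le_rfl⟩]
      · rw [if_neg hc2, if_neg (by omega)]

lemma downChar (grids : List String) (h_ w : Int) :
    ∀ i' j', 0 ≤ i' → i' < h_ →
      ((PySem.List.pyRange 1 h_ 1).foldl (fun a i =>
        (PySem.List.pyRange 0 w 1).foldl (fun a j =>
          if pvCell grids i j == '.' then pvUpd a i j (a (i - 1) j + 1) else a) a) (pvInit grids)) i' j'
      = pvDf grids h_ w i' j' := by
  have initDf : ∀ i j : Int, i ≤ 0 → pvInit grids i j = pvDf grids h_ w i j := by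
    intro i j hi
    unfold pvDf
    by_cases hc : (pvCell grids i j == '.') = true ∧ 0 ≤ i ∧ i < h_ ∧ 0 ≤ j ∧ j < w
    · have hi0 : i = 0 := by omega
      subst hi0
      rw [if_pos hc, show ((0 : Int)).toNat = 0 from rfl, pvB_zero]
      unfold pvInit
      rw [if_pos hc.1]
      norm_num
    · rw [if_neg hc]
  suffices H : ∀ (n : Nat) (t : Int), (h_ - t).toNat = n → 1 ≤ t → ∀ a0 : Int → Int → Int,
      (∀ i j, t ≤ i → a0 i j = pvInit grids i j) →
      (∀ i j, i < t → a0 i j = pvDf grids h_ w i j) →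
      ∀ i' j', ((PySem.List.pyRange t h_ 1).foldl (fun a i =>
          (PySem.List.pyRange 0 w 1).foldl (fun a j =>
            if pvCell grids i j == '.' then pvUpd a i j (a (i - 1) j + 1) else a) a) a0) i' j'
        = if t ≤ i' ∧ i' < h_ then pvDf grids h_ w i' j' else a0 i' j' by
    intro i' j' h0 h1
    rw [H _ 1 rfl le_rfl (pvInit grids) (fun _ _ _ => rfl)
        (fun i j hi => initDf i j (by omega)) i' j']
    by_cases hc : 1 ≤ i' ∧ i' < h_
    · rw [if_pos hc]
    · rw [if_neg hc, initDf i' j' (by omega)]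
  intro n
  induction n with
  | zero =>
    intro t hn ht a0 h0 h1 i' j'
    rw [PySem.List.pyRange_one_eq_nil (a := t) (b := h_) (by omega), List.foldl_nil, if_neg (by omega)]
  | succ n ih =>
    intro t hn ht a0 h0 h1 i' j'
    rw [PySem.List.pyRange_one_cons (a := t) (b := h_) (by omega), List.foldl_cons]
    have hpar := linePar t (-1) (by norm_num) (fun j => pvCell grids t j == '.') w 0 a0
    simp only [← Int.sub_eq_add_neg] at hpar
    have ha1 : ∀ i'' j'', ((PySem.List.pyRange 0 w 1).foldl (fun a j =>
          if pvCell grids t j == '.' then pvUpd a t j (a (t - 1) j + 1) else a) a0) i'' j''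
        = if i'' = t then pvDf grids h_ w t j'' else a0 i'' j'' := by
      intro i'' j''
      rw [hpar i'' j'']
      by_cases hc : i'' = t ∧ 0 ≤ j'' ∧ j'' < w ∧ (pvCell grids t j'' == '.') = true
      · rw [if_pos hc, if_pos hc.1, h1 (t - 1) j'' (by omega)]
        have hstep := colB_succ grids h_ t j'' (by omega) (by omega)
        have hDt : pvDf grids h_ w t j'' = ((pvB (pvCol grids h_ j'') t.toNat : Nat) : Int) + 1 := by
          unfold pvDf
          rw [if_pos ⟨hc.2.2.2, by omega, by omega, hc.2.1, hc.2.2.1⟩]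
        rw [hDt, hstep]
        unfold pvDf
        by_cases hd1 : (pvCell grids (t - 1) j'' == '.') = true
        · rw [if_pos hd1, if_pos ⟨hd1, by omega, by omega, hc.2.1, hc.2.2.1⟩]
          push_cast
          ring
        · rw [if_neg hd1, if_neg (by tauto)]
          unfold pvInit
          rw [if_neg hd1]
          norm_num
      · rw [if_neg hc]
        by_cases hc2 : i'' = t
        · subst hc2
          rw [if_pos rfl, h0 i'' j'' le_rfl]
          unfold pvDf
          rw [if_neg (by tauto)]
        · rw [if_neg hc2]
    have hs1 : ∀ i j, t + 1 ≤ i → ((PySem.List.pyRange 0 w 1).foldl (fun a j =>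
          if pvCell grids t j == '.' then pvUpd a t j (a (t - 1) j + 1) else a) a0) i j = pvInit grids i j := by
      intro i j hi
      rw [ha1 i j, if_neg (by omega), h0 i j (by omega)]
    have hs2 : ∀ i j, i < t + 1 → ((PySem.List.pyRange 0 w 1).foldl (fun a j =>
          if pvCell grids t j == '.' then pvUpd a t j (a (t - 1) j + 1) else a) a0) i j = pvDf grids h_ w i j := by
      intro i j hi
      rw [ha1 i j]
      by_cases hc : i = t
      · rw [if_pos hc, hc]
      · rw [if_neg hc, h1 i j (by omega)]
    rw [ih (t + 1) (by omega) (by omega) _ hs1 hs2 i' j']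
    by_cases hc : t + 1 ≤ i' ∧ i' < h_
    · rw [if_pos hc, if_pos ⟨by omega, hc.2⟩]
    · rw [if_neg hc, ha1 i' j']
      by_cases hc2 : i' = t
      · subst hc2
        rw [if_pos rfl, if_pos ⟨le_rfl, by omega⟩]
      · rw [if_neg hc2, if_neg (by omega)]

def pvAnsFold (grids : List String) (h_ w : Int) (v : Int → Int → Int) : Int :=
  (PySem.List.pyRange 0 h_ 1).foldl (fun ans i =>
    (PySem.List.pyRange 0 w 1).foldl (fun ans j =>
      if pvCell grids i j == '.' then max ans (v i j) else ans) ans) 0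

lemma pvAnsFold_congr (grids : List String) (h_ w : Int) (v v' : Int → Int → Int)
    (hv : ∀ i j, 0 ≤ i → i < h_ → 0 ≤ j → j < w → (pvCell grids i j == '.') = true → v i j = v' i j) :
    pvAnsFold grids h_ w v = pvAnsFold grids h_ w v' := by
  unfold pvAnsFold
  apply PySem.List.foldl_congr_mem
  intro acc i hi
  apply PySem.List.foldl_congr_mem
  intro acc' j hj
  rw [PySem.List.mem_pyRange_one] at hi hj
  by_cases hdot : (pvCell grids i j == '.') = true
  · rw [if_pos hdot, if_pos hdot, hv i j hi.1 hi.2 hj.1 hj.2 hdot]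
  · rw [if_neg hdot, if_neg hdot]

lemma valA_eq_canon (grids : List String) (h_ w : Int) :
    ∀ i j : Int, 0 ≤ i → i < h_ → 0 ≤ j → j < w → (pvCell grids i j == '.') = true →
      (((PySem.List.pyRange (h_ - 2) (-1) (-1)).foldl (fun a i =>
          (PySem.List.pyRange 0 w 1).foldl (fun a j =>
            if pvCell grids i j == '.' then pvUpd a i j (a (i + 1) j + 1) else a) a) (pvInit grids)) i j
       + ((PySem.List.pyRange 1 h_ 1).foldl (fun a i =>
          (PySem.List.pyRange 0 w 1).foldl (fun a j =>
            if pvCell grids i j == '.' then pvUpd a i j (a (i - 1) j + 1) else a) a) (pvInit grids)) i j - 1)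
       + (((PySem.List.pyRange 0 h_ 1).foldl (fun a i =>
          (PySem.List.pyRange (w - 2) (-1) (-1)).foldl (fun a j =>
            if pvCell grids i j == '.' then pvUpd a i j (a i (j + 1) + 1) else a) a) (pvInit grids)) i j
       + ((PySem.List.pyRange 0 h_ 1).foldl (fun a i =>
          (PySem.List.pyRange 1 w 1).foldl (fun a j =>
            if pvCell grids i j == '.' then pvUpd a i j (a i (j - 1) + 1) else a) a) (pvInit grids)) i j - 1) - 1
      = ((pvB (pvRow grids w i) j.toNat : Int) + (pvF (pvRow grids w i) j.toNat : Int))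
        + ((pvB (pvCol grids h_ j) i.toNat : Int) + (pvF (pvCol grids h_ j) i.toNat : Int)) - 1 := by
  intro i j h0 h1 h2 h3 hdot
  rw [upChar grids h_ w i j h0 h1, downChar grids h_ w i j h0 h1,
      leftChar grids h_ w i j, rightChar grids h_ w i j, if_pos ⟨h0, h1⟩, if_pos ⟨h0, h1⟩]
  unfold pvUf pvDf pvLf pvRf
  rw [if_pos ⟨hdot, h0, h1, h2, h3⟩, if_pos ⟨hdot, h0, h1, h2, h3⟩,
      if_pos ⟨hdot, h2, h3⟩, if_pos ⟨hdot, h2, h3⟩]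
  omega

lemma rows_no_empty (rows : List (List Char)) (n : Nat) (hn : 0 < n)
    (hrect : ∀ r ∈ rows, r.length = n) : ¬ rows.any (fun r => r.isEmpty) = true := by
  simp only [List.any_eq_true, not_exists, not_and]
  intro r hr
  have hlen := hrect r hr
  cases r with
  | nil => simp at hlen; omega
  | cons a t => simp

lemma pvCols_length : ∀ (n : Nat) (rows : List (List Char)), rows ≠ [] →
    (∀ r ∈ rows, r.length = n) → (pvCols rows).length = n := by
  intro n
  induction n with
  | zero =>
    intro rows hne hrect
    have hcond : rows = [] ∨ rows.any (fun r => r.isEmpty) = true := by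
      refine Or.inr ?_
      cases rows with
      | nil => simp at hne
      | cons r rs =>
        refine List.any_eq_true.mpr ⟨r, by simp, ?_⟩
        have hlen := hrect r (by simp)
        cases r with
        | nil => simp
        | cons a t => simp at hlen
    rw [pvCols, dif_pos hcond]
    rfl
  | succ n ih =>
    intro rows hne hrect
    rw [pvCols, dif_neg (not_or.mpr ⟨hne, rows_no_empty rows (n + 1) (by omega) hrect⟩)]
    simp only [List.length_cons]
    rw [ih (pvTails rows) (by simp [pvTails, hne]) ?_]
    intro r hr
    obtain ⟨r0, hr0, rfl⟩ := List.mem_map.mp hr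
    have := hrect r0 hr0
    simp [List.length_tail, this]

lemma pvCols_getD : ∀ (j : Nat) (n : Nat) (rows : List (List Char)),
    (∀ r ∈ rows, r.length = n) → j < n →
    (pvCols rows).getD j [] = rows.map (fun r => r.getD j ' ') := by
  intro j
  induction j with
  | zero =>
    intro n rows hrect hj
    cases hrows : rows with
    | nil => rw [pvCols]; simp
    | cons r rs =>
      subst hrows
      rw [pvCols, dif_neg (not_or.mpr ⟨by simp, rows_no_empty _ n (by omega) hrect⟩)]
      simp only [List.getD_cons_zero]
      refine (List.map_congr_left ?_).symm
      intro r0 hr0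
      have hlen := hrect r0 hr0
      cases r0 with
      | nil => simp at hlen; omega
      | cons a t => simp
  | succ j ihj =>
    intro n rows hrect hj
    cases hrows : rows with
    | nil => rw [pvCols]; simp
    | cons r rs =>
      subst hrows
      rw [pvCols, dif_neg (not_or.mpr ⟨by simp, rows_no_empty _ n (by omega) hrect⟩)]
      simp only [List.getD_cons_succ]
      cases n with
      | zero => omega
      | succ n =>
        rw [ihj n (pvTails (r :: rs)) ?_ (by omega)]
        · simp only [pvTails, List.map_map]
          refine List.map_congr_left ?_
          intro r0 hr0
          have hlen := hrect r0 hr0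
          cases r0 with
          | nil => simp at hlen
          | cons a t => simp
        · intro r0 hr0
          obtain ⟨r1, hr1, rfl⟩ := List.mem_map.mp hr0
          have := hrect r1 hr1
          simp [List.length_tail, this]

lemma valB_eq_canon (grids : List String) (h_ w : Int) :
    ∀ i j : Int, 0 ≤ i → i < h_ → 0 ≤ j → j < w → (pvCell grids i j == '.') = true →
      PySem.List.pyGetD (PySem.List.pyGetD (((PySem.List.pyRange 0 h_ 1).map (fun i => pvRow grids w i)).map (fun r => pvRuns r)) i []) j 0
      + PySem.List.pyGetD (PySem.List.pyGetD ((pvCols ((PySem.List.pyRange 0 h_ 1).map (fun i => pvRow grids w i))).map (fun c => pvRuns c)) j []) i 0 - 1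
      = ((pvB (pvRow grids w i) j.toNat : Int) + (pvF (pvRow grids w i) j.toNat : Int))
        + ((pvB (pvCol grids h_ j) i.toNat : Int) + (pvF (pvCol grids h_ j) i.toNat : Int)) - 1 := by
  intro i j h0 h1 h2 h3 hdot
  have hrect : ∀ r ∈ (PySem.List.pyRange 0 h_ 1).map (fun i => pvRow grids w i), r.length = w.toNat := by
    intro r hr
    obtain ⟨i', _, rfl⟩ := List.mem_map.mp hr
    exact pvRow_length grids w i'
  have hnev : (PySem.List.pyRange 0 h_ 1).map (fun i => pvRow grids w i) ≠ [] := by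
    have : ((PySem.List.pyRange 0 h_ 1).map (fun i => pvRow grids w i)).length = h_.toNat := by
      simp [PySem.List.length_pyRange_one]
    intro hc
    rw [hc] at this
    simp at this
    omega
  have hcolslen : (pvCols ((PySem.List.pyRange 0 h_ 1).map (fun i => pvRow grids w i))).length = w.toNat :=
    pvCols_length w.toNat _ hnev hrect
  -- hrun lookup
  rw [List.map_map, PySem.List.pyGetD_map_pyRange_of_nonneg _ _ _ _ h0 h1]
  simp only [Function.comp_apply]
  -- vrun lookup
  rw [PySem.List.pyGetD_eq_getElem ((pvCols ((PySem.List.pyRange 0 h_ 1).map (fun i => pvRow grids w i))).map (fun c => pvRuns c)) [] h2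
        (by rw [List.length_map, hcolslen]; omega)]
  rw [List.getElem_map]
  have hg := pvCols_getD j.toNat w.toNat ((PySem.List.pyRange 0 h_ 1).map (fun i => pvRow grids w i)) hrect (by omega)
  rw [List.getD_eq_getElem _ _ (by rw [hcolslen]; omega)] at hg
  have hmap : ((PySem.List.pyRange 0 h_ 1).map (fun i => pvRow grids w i)).map (fun r => r.getD j.toNat ' ')
      = pvCol grids h_ j := by
    rw [List.map_map]
    unfold pvCol
    refine List.map_congr_left ?_
    intro i' _
    simp only [Function.comp_apply]
    rw [List.getD_eq_getElem _ _ (by rw [pvRow_length]; omega)]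
    exact rowCell grids w i' j h2 h3
  rw [hg, hmap]
  -- both lookups are now runs of the row / the column
  have hrowlen : j.toNat < (pvRuns (pvRow grids w i)).length := by
    rw [pvRuns_length, pvRow_length]; omega
  have hcollen : i.toNat < (pvRuns (pvCol grids h_ j)).length := by
    rw [pvRuns_length, pvCol_length]; omega
  have hrq : (pvRow grids w i)[j.toNat]? = some '.' := by
    rw [List.getElem?_eq_getElem (by rw [pvRow_length]; omega)]
    exact congrArg some ((rowCell grids w i j h2 h3).trans (beq_iff_eq.mp hdot))
  have hcq : (pvCol grids h_ j)[i.toNat]? = some '.' := by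
    rw [List.getElem?_eq_getElem (by rw [pvCol_length]; omega)]
    exact congrArg some ((colCell grids h_ i j h0 h1).trans (beq_iff_eq.mp hdot))
  have hrow := pvRuns_getD (pvRow grids w i) j.toNat hrq
  have hcol := pvRuns_getD (pvCol grids h_ j) i.toNat hcq
  rw [PySem.List.pyGetD_eq_getElem (pvRuns (pvRow grids w i)) 0 h2 (by rw [pvRuns_length, pvRow_length]; omega),
      PySem.List.pyGetD_eq_getElem (pvRuns (pvCol grids h_ j)) 0 h0 (by rw [pvRuns_length, pvCol_length]; omega)]
  rw [List.getD_eq_getElem _ _ hrowlen] at hrow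
  rw [List.getD_eq_getElem _ _ hcollen] at hcol
  rw [hrow, hcol]

-- ===== VERDICT (by name: the statement is the Claim_ definition above) =====
theorem count_cells_spec : Claim_equal_count_cells := by
  unfold Claim_equal_count_cells
  intro grids h_ w _ _
  unfold Spec_count_cells
  rw [show count_cells grids h_ w = pvAnsFold grids h_ w (fun i j =>
      (((PySem.List.pyRange (h_ - 2) (-1) (-1)).foldl (fun a i =>
          (PySem.List.pyRange 0 w 1).foldl (fun a j =>
            if pvCell grids i j == '.' then pvUpd a i j (a (i + 1) j + 1) else a) a) (pvInit grids)) i j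
       + ((PySem.List.pyRange 1 h_ 1).foldl (fun a i =>
          (PySem.List.pyRange 0 w 1).foldl (fun a j =>
            if pvCell grids i j == '.' then pvUpd a i j (a (i - 1) j + 1) else a) a) (pvInit grids)) i j - 1)
       + (((PySem.List.pyRange 0 h_ 1).foldl (fun a i =>
          (PySem.List.pyRange (w - 2) (-1) (-1)).foldl (fun a j =>
            if pvCell grids i j == '.' then pvUpd a i j (a i (j + 1) + 1) else a) a) (pvInit grids)) i j
       + ((PySem.List.pyRange 0 h_ 1).foldl (fun a i =>
          (PySem.List.pyRange 1 w 1).foldl (fun a j =>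
            if pvCell grids i j == '.' then pvUpd a i j (a i (j - 1) + 1) else a) a) (pvInit grids)) i j - 1) - 1)
    from rfl]
  rw [show count_cells_alt grids h_ w = pvAnsFold grids h_ w (fun i j =>
      PySem.List.pyGetD (PySem.List.pyGetD (((PySem.List.pyRange 0 h_ 1).map (fun i => pvRow grids w i)).map (fun r => pvRuns r)) i []) j 0
      + PySem.List.pyGetD (PySem.List.pyGetD ((pvCols ((PySem.List.pyRange 0 h_ 1).map (fun i => pvRow grids w i))).map (fun c => pvRuns c)) j []) i 0 - 1)
    from rfl]
  refine Eq.trans (b := pvAnsFold grids h_ w (fun i j =>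
      ((pvB (pvRow grids w i) j.toNat : Int) + (pvF (pvRow grids w i) j.toNat : Int))
      + ((pvB (pvCol grids h_ j) i.toNat : Int) + (pvF (pvCol grids h_ j) i.toNat : Int)) - 1)) ?_ ?_
  · exact pvAnsFold_congr grids h_ w _ _ (valA_eq_canon grids h_ w)
  · exact (pvAnsFold_congr grids h_ w _ _ (valB_eq_canon grids h_ w)).symm
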